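-- pv_equiv track=rewrite | github.com/Andris-Huang/Hog-Strategy | hog.py | piggy_points
-- ===== SOURCE A (Python) =====
-- def piggy_points(score):
--     """Return the points scored from rolling 0 dice.
--
--     score:  The opponent's current score.
--     """
--     # BEGIN PROBLEM 2
--     score_squared = score ** 2
--     last_digit_1 = score_squared % 10
--     minimum = last_digit_1
--     while score_squared >= 10:
--         last_digit = score_squared //10 % 10
--         if last_digit < minimum:
--             minimum = last_digit
--         score_squared = score_squared // 10
--     return minimum + 3
-- ===== SOURCE B (Python) =====
-- def piggy_points(score):
--     """Return the points scored from rolling 0 dice.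
--
--     score:  The opponent's current score.
--     """
--     s = str(score ** 2)
--     for d in "0123456789":
--         if d in s:
--             return int(d) + 3
-- ===== Notes on version B (the rewrite author's own statement) =====
-- stated objective: alternative
-- what changed: Instead of scanning the digits of score**2 while tracking a running minimum, B searches candidate digits 0..9 in increasing order and returns the first one that occurs in str(score**2), so the minimum digit is found by membership tests rather than a min-tracking pass.
import Mathlib
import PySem

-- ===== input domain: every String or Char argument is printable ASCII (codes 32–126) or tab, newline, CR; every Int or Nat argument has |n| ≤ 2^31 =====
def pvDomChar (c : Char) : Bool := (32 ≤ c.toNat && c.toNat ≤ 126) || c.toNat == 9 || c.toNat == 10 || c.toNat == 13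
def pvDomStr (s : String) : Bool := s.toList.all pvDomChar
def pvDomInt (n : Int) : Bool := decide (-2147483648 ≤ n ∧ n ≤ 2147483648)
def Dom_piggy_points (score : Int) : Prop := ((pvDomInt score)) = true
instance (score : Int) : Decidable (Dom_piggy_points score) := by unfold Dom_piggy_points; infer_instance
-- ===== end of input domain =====

-- B finds the minimum digit of score**2 by trying candidate digits 0..9 in increasing order with a membership test in str(score**2), instead of A's digit-peeling min-tracking loop (alternative algorithm, similar cost).


-- ===== PORT A =====
-- the while loop of A: while score_squared >= 10: peel a digit, keep the running minimum
def pvLoopA (score_squared : Int) (minimum : Int) : Int :=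
  if _h : 10 ≤ score_squared then
    let last_digit := PySem.Int.mod (PySem.Int.floordiv score_squared 10) 10
    pvLoopA (PySem.Int.floordiv score_squared 10)
      (if last_digit < minimum then last_digit else minimum)
  else minimum
termination_by score_squared.toNat
decreasing_by
  rw [PySem.Int.floordiv_eq_ediv_of_pos (by norm_num)]
  omega

def piggy_points (score : Int) : Int :=
  let score_squared := score ^ 2
  let last_digit_1 := PySem.Int.mod score_squared 10
  pvLoopA score_squared last_digit_1 + 3

-- ===== PORT B =====
-- for d in "0123456789": if d in s: return int(d) + 3.  int(d) for a digit char is its code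
-- minus 48.  str(score**2) always contains a decimal digit, so the loop always returns and
-- Python never falls through to None; the `none` branch (getD-style default 0) is unreachable.
def piggy_points_alt (score : Int) : Int :=
  let s := PySem.Int.toChars (score ^ 2)
  match ("0123456789".toList).find? (fun d => s.contains d) with
  | some d => ((d.toNat : Int) - 48) + 3
  | none => 0

-- ===== PRECONDITION & SPEC =====
def Spec_piggy_points (score : Int) (out : Int) : Prop := out = piggy_points_alt score
instance (score : Int) (out : Int) : Decidable (Spec_piggy_points score out) := by unfold Spec_piggy_points; infer_instance

-- ===== CLAIM (what is proved, stated in full; the proofs are below) =====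
def Claim_equal_piggy_points : Prop := ∀ (score : Int), Dom_piggy_points score → Spec_piggy_points score (piggy_points score)

-- ===== LEMMAS AND PROOFS =====

-- minimum decimal digit of n (n itself when n < 10): the value both programs compute
def pvMdig (n : Nat) : Nat :=
  if n < 10 then n else min (n % 10) (pvMdig (n / 10))
termination_by n
decreasing_by omega

-- the decimal digits of n, most significant first
def pvDigs (n : Nat) : List Nat :=
  if n < 10 then [n] else pvDigs (n / 10) ++ [n % 10]
termination_by n
decreasing_by omega

theorem pvMdig_small (n : Nat) (h : n < 10) : pvMdig n = n := by
  rw [pvMdig]; simp [h]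

theorem pvMdig_rec (n : Nat) (h : ¬ n < 10) : pvMdig n = min (n % 10) (pvMdig (n / 10)) := by
  rw [pvMdig]; simp [h]

theorem pvLoopA_eq (N : Nat) (acc : Int) :
    pvLoopA (N : Int) acc = if 10 ≤ N then min acc ((pvMdig (N / 10) : Nat) : Int) else acc := by
  induction N using Nat.strong_induction_on generalizing acc with
  | _ N ih =>
    rw [pvLoopA]
    by_cases hN : 10 ≤ N
    · have hc : (10:Int) ≤ (N : Int) := by exact_mod_cast hN
      rw [dif_pos hc]
      have hd : PySem.Int.floordiv ((N : Nat) : Int) 10 = ((N / 10 : Nat) : Int) := by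
        rw [PySem.Int.floordiv_eq_ediv_of_pos (by norm_num)]; omega
      have hm : PySem.Int.mod (((N / 10 : Nat) : Int)) 10 = ((N / 10 % 10 : Nat) : Int) := by
        rw [PySem.Int.mod_eq_emod_of_pos (by norm_num)]; omega
      rw [hd, hm, ih (N / 10) (by omega), if_pos hN]
      by_cases h2 : N / 10 < 10
      · rw [if_neg (by omega), pvMdig_small (N / 10) h2, Nat.mod_eq_of_lt h2]
        split_ifs with h3 <;> omega
      · rw [if_pos (by omega), pvMdig_rec (N / 10) h2]
        push_cast
        split_ifs with h3 <;> omega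
    · have hc : ¬ (10:Int) ≤ (N : Int) := by exact_mod_cast hN
      rw [dif_neg hc, if_neg hN]

theorem pvLoopA_mdig (n : Nat) :
    pvLoopA (n : Int) ((n % 10 : Nat) : Int) = ((pvMdig n : Nat) : Int) := by
  rw [pvLoopA_eq]
  by_cases h : 10 ≤ n
  · rw [if_pos h, pvMdig_rec n (by omega)]
    push_cast
    omega
  · rw [if_neg h, pvMdig_small n (by omega), Nat.mod_eq_of_lt (by omega)]

theorem pvCore_shift (f : Nat) : ∀ (n : Nat) (ds : List Char),
    Nat.toDigitsCore 10 f n ds = Nat.toDigitsCore 10 f n [] ++ ds := by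
  induction f with
  | zero => intro n ds; simp [Nat.toDigitsCore]
  | succ g ih =>
    intro n ds
    simp only [Nat.toDigitsCore]
    by_cases h : n / 10 = 0
    · simp [h]
    · simp only [h]
      rw [ih (n / 10) ((n % 10).digitChar :: ds), ih (n / 10) [(n % 10).digitChar]]
      simp

theorem pvCore_fuel (f : Nat) : ∀ (n : Nat), n < f → ∀ (f' : Nat), n < f' →
    Nat.toDigitsCore 10 f n [] = Nat.toDigitsCore 10 f' n [] := by
  induction f with
  | zero => intro n h; omega
  | succ g ih =>
    intro n _ f' hf'
    obtain ⟨g', rfl⟩ : ∃ g', f' = g' + 1 := ⟨f' - 1, by omega⟩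
    simp only [Nat.toDigitsCore]
    by_cases h : n / 10 = 0
    · simp [h]
    · have hn : 10 ≤ n := by omega
      have hlt : n / 10 < n := Nat.div_lt_self (by omega) (by norm_num)
      simp only [h]
      rw [pvCore_shift g, pvCore_shift g']
      rw [ih (n / 10) (by omega) g' (by omega)]

theorem pvToDigits_small (n : Nat) (h : n < 10) :
    Nat.toDigits 10 n = [Nat.digitChar n] := by
  have h0 : n / 10 = 0 := Nat.div_eq_of_lt h
  simp [Nat.toDigits, Nat.toDigitsCore, h0, Nat.mod_eq_of_lt h]

theorem pvToDigits_step (n : Nat) (h : 10 ≤ n) :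
    Nat.toDigits 10 n = Nat.toDigits 10 (n / 10) ++ [Nat.digitChar (n % 10)] := by
  have h0 : n / 10 ≠ 0 := by omega
  have hlt : n / 10 < n := Nat.div_lt_self (by omega) (by norm_num)
  show Nat.toDigitsCore 10 (n + 1) n [] = _
  simp only [Nat.toDigitsCore, h0]
  rw [pvCore_shift n, pvCore_fuel n (n / 10) (by omega) (n / 10 + 1) (by omega)]
  rfl

-- str(n) is pvDigs n rendered as characters
theorem pvToDigits_digs (n : Nat) :
    Nat.toDigits 10 n = (pvDigs n).map Nat.digitChar := by
  induction n using Nat.strong_induction_on with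
  | _ n ih =>
    by_cases h : n < 10
    · rw [pvToDigits_small n h, pvDigs]; simp [h]
    · rw [pvToDigits_step n (by omega), pvDigs, if_neg h,
        ih (n / 10) (Nat.div_lt_self (by omega) (by norm_num))]
      simp

theorem pvDigs_lt (n : Nat) : ∀ x ∈ pvDigs n, x < 10 := by
  induction n using Nat.strong_induction_on with
  | _ n ih =>
    intro x hx
    rw [pvDigs] at hx
    by_cases h : n < 10
    · simp [h] at hx; omega
    · simp only [if_neg h, List.mem_append, List.mem_singleton] at hx
      rcases hx with hx | hx
      · exact ih (n / 10) (Nat.div_lt_self (by omega) (by norm_num)) x hx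
      · subst hx; exact Nat.mod_lt n (by norm_num)

theorem pvMdig_mem (n : Nat) : pvMdig n ∈ pvDigs n := by
  induction n using Nat.strong_induction_on with
  | _ n ih =>
    rw [pvDigs, pvMdig]
    by_cases h : n < 10
    · simp [h]
    · simp only [if_neg h, List.mem_append, List.mem_singleton]
      have := ih (n / 10) (Nat.div_lt_self (by omega) (by norm_num))
      rcases Nat.le_total (n % 10) (pvMdig (n / 10)) with hle | hle
      · right; omega
      · left; rwa [min_eq_right hle]

theorem pvMdig_le (n : Nat) : ∀ x ∈ pvDigs n, pvMdig n ≤ x := by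
  induction n using Nat.strong_induction_on with
  | _ n ih =>
    intro x hx
    rw [pvDigs] at hx
    rw [pvMdig]
    by_cases h : n < 10
    · simp [h] at hx ⊢; omega
    · simp only [if_neg h, List.mem_append, List.mem_singleton] at hx
      rw [if_neg h]
      rcases hx with hx | hx
      · have := ih (n / 10) (Nat.div_lt_self (by omega) (by norm_num)) x hx
        omega
      · omega

theorem pvDigitChar_inj (a b : Nat) (ha : a < 10) (hb : b < 10) :
    Nat.digitChar a = Nat.digitChar b ↔ a = b := by
  interval_cases a <;> interval_cases b <;> decide

-- first element of range' a b satisfying p, characterised by minimality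
theorem pvFind_range' (p : Nat → Bool) : ∀ (b a m : Nat), a ≤ m → m < a + b → p m = true →
    (∀ k, a ≤ k → k < m → p k = false) → (List.range' a b).find? p = some m := by
  intro b
  induction b with
  | zero => intro a m h1 h2 _ _; omega
  | succ n ih =>
    intro a m h1 h2 hp hmin
    rw [List.range'_succ, List.find?_cons]
    by_cases hm : m = a
    · subst hm; simp [hp]
    · have hpa : p a = false := hmin a (le_refl a) (by omega)
      simp only [hpa]
      exact ih (a + 1) m (by omega) (by omega) hp (fun k hk1 hk2 => hmin k (by omega) hk2)

theorem pvDigitStr : "0123456789".toList = (List.range 10).map Nat.digitChar := by decide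

-- ===== VERDICT (by name: the statement is the Claim_ definition above) =====
theorem piggy_points_spec : Claim_equal_piggy_points := by
  intro score _
  unfold Spec_piggy_points piggy_points piggy_points_alt
  have hnn : (0:Int) ≤ score ^ 2 := sq_nonneg score
  have hcast : score ^ 2 = (((score ^ 2).toNat : Nat) : Int) := by omega
  set n : Nat := (score ^ 2).toNat with hn
  rw [hcast]
  have hm : PySem.Int.mod ((n : Nat) : Int) 10 = ((n % 10 : Nat) : Int) := by
    rw [PySem.Int.mod_eq_emod_of_pos (by norm_num)]; omega
  simp only [PySem.Int.toChars]
  rw [if_neg (by omega)]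
  have htn : ((n : Int)).toNat = n := by omega
  rw [htn, hm, pvLoopA_mdig n, pvToDigits_digs n, pvDigitStr, List.find?_map]
  have hfind : (List.range 10).find? ((fun d => ((pvDigs n).map Nat.digitChar).contains d) ∘ Nat.digitChar)
      = some (pvMdig n) := by
    rw [List.range_eq_range']
    apply pvFind_range' _ 10 0 (pvMdig n) (Nat.zero_le _)
    · have := pvDigs_lt n (pvMdig n) (pvMdig_mem n); omega
    · simp only [Function.comp, List.contains_iff_mem, List.mem_map]
      exact ⟨pvMdig n, pvMdig_mem n, rfl⟩
    · intro k _ hk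
      simp only [Function.comp, Bool.eq_false_iff, ne_eq, List.contains_iff_mem, List.mem_map]
      rintro ⟨x, hx, hxe⟩
      have hx10 := pvDigs_lt n x hx
      have hk10 : k < 10 := by
        have := pvDigs_lt n (pvMdig n) (pvMdig_mem n); omega
      rw [pvDigitChar_inj x k hx10 hk10] at hxe
      subst hxe
      have := pvMdig_le n x hx
      omega
  rw [hfind]
  simp only [Option.map_some]
  have hlt : pvMdig n < 10 := pvDigs_lt n (pvMdig n) (pvMdig_mem n)
  have : ((Nat.digitChar (pvMdig n)).toNat : Int) - 48 = ((pvMdig n : Nat) : Int) := by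
    interval_cases h : (pvMdig n) <;> decide
  rw [this]
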